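-- pv_equiv track=rewrite | github.com/anthonykish/EECE590X | libs/wave_utils/wave_utils.py | to_dotless
-- ===== SOURCE A (Python) =====
-- def to_dotless(dotted):
--
--     """
--     Turns a dotted signal (1..0..1.) into dotless (11100011)
--     """
--
--     dotless = ""
--     signal_value = ""
--
--     # Iterate through every character in the dotted signal
--     for i in dotted:
--         # Turn dots into 1 or 0 depending on what was last seen
--         if i == ".":
--             dotless += signal_value
--         # Preserve 1s and 0s while noting what was last seen
--         else:
--             dotless += i
--             signal_value = i
--
--     return dotless
-- ===== SOURCE B (Python) =====
-- def to_dotless(dotted):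
--     """
--     Turns a dotted signal (1..0..1.) into dotless (11100011)
--     """
--     out = []
--     i = 0
--     n = len(dotted)
--     while i < n:
--         c = dotted[i]
--         if c == ".":
--             i += 1  # dot before any symbol: nothing to expand
--             continue
--         j = i + 1
--         while j < n and dotted[j] == ".":
--             j += 1
--         out.append(c * (j - i))
--         i = j
--     return "".join(out)
-- ===== Notes on version B (the rewrite author's own statement) =====
-- stated objective: alternative
-- what changed: Replaces the per-character carry-forward of a last-seen-symbol state variable by run-length expansion: tokenize into (symbol, following dot-run) groups and emit symbol*(1+run) via string multiplication, skipping leading dots.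
import Mathlib
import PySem

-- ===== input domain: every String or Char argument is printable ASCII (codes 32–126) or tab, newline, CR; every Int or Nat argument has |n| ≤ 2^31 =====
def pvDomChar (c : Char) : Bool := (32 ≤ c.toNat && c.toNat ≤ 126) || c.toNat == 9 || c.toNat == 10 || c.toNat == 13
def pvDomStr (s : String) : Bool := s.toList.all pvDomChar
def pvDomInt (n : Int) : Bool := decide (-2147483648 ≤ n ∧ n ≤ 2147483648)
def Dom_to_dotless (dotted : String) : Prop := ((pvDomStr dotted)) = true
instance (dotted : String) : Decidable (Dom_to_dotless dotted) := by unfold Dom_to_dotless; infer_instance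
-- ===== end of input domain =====

-- B replaces A's per-character last-seen-state carry-forward by run-length expansion
-- over (symbol, trailing dot-run) groups; same result, alternative decomposition.


-- ===== PORT A =====
-- fold state: (dotless so far, signal_value = last-seen symbol, "" initially)
def to_dotless (dotted : String) : String :=
  let res := dotted.toList.foldl
    (fun (st : List Char × List Char) i =>
      if i = '.' then (st.1 ++ st.2, st.2) else (st.1 ++ [i], [i]))
    ([], [])
  String.ofList res.1

-- ===== PORT B =====
-- the single while loop of Source B: skip a dot, or emit c*(1+run of dots) and jump past the run
def toDotlessAltGo : List Char → List Char
  | [] => []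
  | c :: rest =>
    if c = '.' then toDotlessAltGo rest
    else
      List.replicate (1 + (rest.takeWhile (· = '.')).length) c
        ++ toDotlessAltGo (rest.dropWhile (· = '.'))
termination_by l => l.length
decreasing_by
  all_goals
    have := List.length_dropWhile_le (fun x => decide (x = '.')) rest
    simp at this ⊢ <;> omega

def to_dotless_alt (dotted : String) : String :=
  String.ofList (toDotlessAltGo dotted.toList)

-- ===== PRECONDITION & SPEC =====
def Spec_to_dotless (dotted : String) (out : String) : Prop := out = to_dotless_alt dotted
instance (dotted : String) (out : String) : Decidable (Spec_to_dotless dotted out) := by unfold Spec_to_dotless; infer_instance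

-- ===== CLAIM (what is proved, stated in full; the proofs are below) =====
def Claim_equal_to_dotless : Prop := ∀ (dotted : String), Dom_to_dotless dotted → Spec_to_dotless dotted (to_dotless dotted)

-- ===== LEMMAS AND PROOFS =====

-- A's fold, written as structural recursion on the remaining input with the signal value sv
def aGo (sv : List Char) : List Char → List Char
  | [] => []
  | c :: rest => if c = '.' then sv ++ aGo sv rest else c :: aGo [c] rest

theorem aGo_foldl (l : List Char) : ∀ (acc sv : List Char),
    (l.foldl (fun (st : List Char × List Char) i =>
      if i = '.' then (st.1 ++ st.2, st.2) else (st.1 ++ [i], [i])) (acc, sv)).1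
      = acc ++ aGo sv l := by
  induction l with
  | nil => intro acc sv; simp [aGo]
  | cons c rest ih =>
    intro acc sv
    by_cases h : c = '.' <;> simp [aGo, h, List.foldl_cons, ih]

theorem altGo_dropWhile (l : List Char) :
    toDotlessAltGo (l.dropWhile (· = '.')) = toDotlessAltGo l := by
  induction l with
  | nil => rfl
  | cons c rest ih =>
    by_cases h : c = '.' <;> simp [h, toDotlessAltGo, ih]

theorem aGo_symbol (l : List Char) : ∀ (c : Char), c ≠ '.' →
    aGo [c] l = List.replicate (l.takeWhile (· = '.')).length c ++ toDotlessAltGo l := by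
  induction l with
  | nil => intro c _; simp [aGo, toDotlessAltGo]
  | cons d rest ih =>
    intro c hc
    by_cases h : d = '.'
    · subst h
      simp [aGo, toDotlessAltGo, List.replicate_succ, ih c hc]
    · simp [aGo, h, toDotlessAltGo, List.replicate_succ,
        ih d h, altGo_dropWhile, Nat.one_add]

theorem aGo_nil (l : List Char) : aGo [] l = toDotlessAltGo l := by
  induction l with
  | nil => simp [aGo, toDotlessAltGo]
  | cons c rest ih =>
    by_cases h : c = '.'
    · simp [aGo, h, toDotlessAltGo, ih]
    · simp [aGo, h, toDotlessAltGo, List.replicate_succ,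
        aGo_symbol rest c h, altGo_dropWhile, Nat.one_add]

-- ===== VERDICT (by name: the statement is the Claim_ definition above) =====
theorem to_dotless_spec : Claim_equal_to_dotless := by
  intro dotted _
  show _ = _
  simp [to_dotless, to_dotless_alt, aGo_foldl, aGo_nil]
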